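-- pv_equiv track=rewrite | github.com/marek3993/Intuition_Memory_Layer | use_cases/support_v1/build_support_v1_pdf_guides.py | parse_blocks
-- ===== SOURCE A (Python) =====
-- def parse_blocks(markdown_text: str) -> list[tuple[str, str]]:
--     blocks: list[tuple[str, str]] = []
--     paragraph_lines: list[str] = []
--
--     def flush_paragraph() -> None:
--         if paragraph_lines:
--             blocks.append(("paragraph", " ".join(line.strip() for line in paragraph_lines)))
--             paragraph_lines.clear()
--
--     for raw_line in markdown_text.splitlines():
--         line = raw_line.rstrip()
--         stripped = line.strip()
--         if not stripped:
--             flush_paragraph()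
--             continue
--         if stripped.startswith("# "):
--             flush_paragraph()
--             blocks.append(("title", stripped[2:].strip()))
--             continue
--         if stripped.startswith("## "):
--             flush_paragraph()
--             blocks.append(("heading", stripped[3:].strip()))
--             continue
--         if stripped.startswith("- "):
--             flush_paragraph()
--             blocks.append(("bullet", stripped[2:].strip()))
--             continue
--         paragraph_lines.append(stripped)
--
--     flush_paragraph()
--     return blocks
-- ===== SOURCE B (Python) =====
-- def parse_blocks(markdown_text: str) -> list[tuple[str, str]]:
--     # Pass 1: classify every line into a typed token.
--     def classify(raw_line: str) -> tuple[str, str]: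
--         stripped = raw_line.rstrip().strip()
--         if not stripped:
--             return ("blank", "")
--         if stripped.startswith("# "):
--             return ("title", stripped[2:].strip())
--         if stripped.startswith("## "):
--             return ("heading", stripped[3:].strip())
--         if stripped.startswith("- "):
--             return ("bullet", stripped[2:].strip())
--         return ("paragraph", stripped)
--
--     tokens = [classify(r) for r in markdown_text.splitlines()]
--
--     # Pass 2: walk the tokens, consuming each maximal run of paragraph
--     # tokens as one block; blanks emit nothing, the rest pass through.
--     out: list[tuple[str, str]] = []
--     i = 0
--     n = len(tokens)
--     while i < n:
--         kind, text = tokens[i]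
--         if kind == "paragraph":
--             j = i
--             while j < n and tokens[j][0] == "paragraph":
--                 j += 1
--             out.append(("paragraph", " ".join(t for _, t in tokens[i:j])))
--             i = j
--         elif kind == "blank":
--             i += 1
--         else:
--             out.append((kind, text))
--             i += 1
--     return out
-- ===== Notes on version B (the rewrite author's own statement) =====
-- stated objective: alternative
-- what changed: Replaces A's single pass with a mutable pending-paragraph buffer flushed inside every branch by a two-pass design: first classify each line into a typed token (blank/title/heading/bullet/paragraph), then walk the token list consuming each maximal run of paragraph tokens as one joined block.
import Mathlib
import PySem

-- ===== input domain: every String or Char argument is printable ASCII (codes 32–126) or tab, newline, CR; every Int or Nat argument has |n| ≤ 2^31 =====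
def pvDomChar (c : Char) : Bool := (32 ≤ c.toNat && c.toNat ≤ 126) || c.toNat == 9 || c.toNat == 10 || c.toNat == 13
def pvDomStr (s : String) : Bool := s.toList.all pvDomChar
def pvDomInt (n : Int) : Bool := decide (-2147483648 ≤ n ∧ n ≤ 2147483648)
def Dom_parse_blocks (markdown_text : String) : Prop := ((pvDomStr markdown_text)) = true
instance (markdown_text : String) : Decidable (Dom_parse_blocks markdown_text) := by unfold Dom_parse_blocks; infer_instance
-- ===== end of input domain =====

-- B replaces A's mutable pending-paragraph buffer (flushed in every branch) by a two-pass
-- design — classify each line into a typed token, then coalesce maximal paragraph runs —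
-- same cost, different decomposition.

-- ===== PORT A =====
def pvFlushA (st : List (String × String) × List String) : List (String × String) × List String :=
  if st.2 = [] then st
  else (st.1 ++ [("paragraph", PySem.Str.join " " (st.2.map PySem.Str.strip))], [])

def pvStepA (st : List (String × String) × List String) (raw_line : String) :
    List (String × String) × List String :=
  let line := PySem.Str.rstrip raw_line
  let stripped := PySem.Str.strip line
  if stripped = "" then pvFlushA st
  else if PySem.Str.startswith stripped "# " then
    let st' := pvFlushA st
    (st'.1 ++ [("title", PySem.Str.strip (PySem.Str.slice stripped (some 2) none))], st'.2)
  else if PySem.Str.startswith stripped "## " then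
    let st' := pvFlushA st
    (st'.1 ++ [("heading", PySem.Str.strip (PySem.Str.slice stripped (some 3) none))], st'.2)
  else if PySem.Str.startswith stripped "- " then
    let st' := pvFlushA st
    (st'.1 ++ [("bullet", PySem.Str.strip (PySem.Str.slice stripped (some 2) none))], st'.2)
  else (st.1, st.2 ++ [stripped])

def parse_blocks (markdown_text : String) : List (String × String) :=
  (pvFlushA ((PySem.Str.splitlines markdown_text).foldl pvStepA ([], []))).1

-- ===== PORT B =====
def pvClassify (raw_line : String) : String × String :=
  let stripped := PySem.Str.strip (PySem.Str.rstrip raw_line)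
  if stripped = "" then ("blank", "")
  else if PySem.Str.startswith stripped "# " then
    ("title", PySem.Str.strip (PySem.Str.slice stripped (some 2) none))
  else if PySem.Str.startswith stripped "## " then
    ("heading", PySem.Str.strip (PySem.Str.slice stripped (some 3) none))
  else if PySem.Str.startswith stripped "- " then
    ("bullet", PySem.Str.strip (PySem.Str.slice stripped (some 2) none))
  else ("paragraph", stripped)

def pvIsPara (t : String × String) : Bool := t.1 == "paragraph"

def pvCoalesce : List (String × String) → List (String × String)
  | [] => []
  | t :: rest =>
    if pvIsPara t then
      ("paragraph", PySem.Str.join " " (t.2 :: (rest.takeWhile pvIsPara).map Prod.snd))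
        :: pvCoalesce (rest.dropWhile pvIsPara)
    else if t.1 = "blank" then pvCoalesce rest
    else t :: pvCoalesce rest
termination_by l => l.length
decreasing_by
  · have := List.length_dropWhile_le pvIsPara rest; simp; omega
  · simp
  · simp

def parse_blocks_alt (markdown_text : String) : List (String × String) :=
  pvCoalesce ((PySem.Str.splitlines markdown_text).map pvClassify)

-- ===== PRECONDITION & SPEC =====
def Spec_parse_blocks (markdown_text : String) (out : List (String × String)) : Prop := out = parse_blocks_alt markdown_text
instance (markdown_text : String) (out : List (String × String)) : Decidable (Spec_parse_blocks markdown_text out) := by unfold Spec_parse_blocks; infer_instance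

-- ===== CLAIM (what is proved, stated in full; the proofs are below) =====
def Claim_equal_parse_blocks : Prop := ∀ (markdown_text : String), Dom_parse_blocks markdown_text → Spec_parse_blocks markdown_text (parse_blocks markdown_text)

-- ===== LEMMAS AND PROOFS =====

def pvMkPara (s : String) : String × String := ("paragraph", s)

theorem pvCoalesce_cons (t : String × String) (rest : List (String × String)) :
    pvCoalesce (t :: rest) =
      if pvIsPara t then
        ("paragraph", PySem.Str.join " " (t.2 :: (rest.takeWhile pvIsPara).map Prod.snd))
          :: pvCoalesce (rest.dropWhile pvIsPara)
      else if t.1 = "blank" then pvCoalesce rest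
      else t :: pvCoalesce rest := by
  rw [pvCoalesce]

theorem pv_dropWhile_idem {α : Type} (p : α → Bool) (l : List α) :
    (l.dropWhile p).dropWhile p = l.dropWhile p := by
  induction l with
  | nil => simp
  | cons a t ih =>
    by_cases hp : p a = true
    · simp [hp, ih]
    · simp [hp]

theorem pv_head_false {α : Type} (p : α → Bool) (a : α) (t : List α)
    (h : List.dropWhile p (a :: t) = a :: t) : p a = false := by
  by_cases hp : p a = true
  · rw [List.dropWhile_cons, if_pos hp] at h
    have h1 := List.length_dropWhile_le p t
    have h2 := congrArg List.length h
    simp at h2; omega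
  · simpa using hp

-- strip is idempotent (on char lists)
theorem pv_strip_idem (l : List Char) :
    PySem.Chars.strip (PySem.Chars.strip l) = PySem.Chars.strip l := by
  unfold PySem.Chars.strip PySem.Chars.lstrip PySem.Chars.rstrip
  set sp := PySem.Chars.isspace with hsp
  set m := l.dropWhile sp with hm
  set r := (m.reverse.dropWhile sp).reverse with hr
  have hpref : ∃ s, m = r ++ s := by
    obtain ⟨s, hs⟩ := List.dropWhile_suffix (l := m.reverse) (p := sp)
    refine ⟨s.reverse, ?_⟩
    conv_lhs => rw [← m.reverse_reverse, ← hs]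
    rw [List.reverse_append, hr]
  have hlstr : r.dropWhile sp = r := by
    rcases hrc : r with _ | ⟨a, t⟩
    · simp
    · obtain ⟨s, hs⟩ := hpref
      have hms : m = a :: (t ++ s) := by rw [hs, hrc]; simp
      have hmm : List.dropWhile sp (a :: (t ++ s)) = a :: (t ++ s) := by
        rw [← hms, hm, pv_dropWhile_idem]
      have hhead : sp a = false := pv_head_false sp a (t ++ s) hmm
      simp [hhead]
  rw [hlstr, List.reverse_reverse, pv_dropWhile_idem]

theorem pv_strip_idem_str (s : String) :
    PySem.Str.strip (PySem.Str.strip s) = PySem.Str.strip s := by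
  have h1 : (PySem.Str.strip s).toList = PySem.Chars.strip s.toList := by simp [pysem]
  simp [PySem.Str.strip, pv_strip_idem]

-- takeWhile/dropWhile over a paragraph-token prefix followed by a non-paragraph head
theorem pv_tw_dw (ps : List String) (toks : List (String × String))
    (h : ∀ t ∈ toks.head?, pvIsPara t = false) :
    (ps.map pvMkPara ++ toks).takeWhile pvIsPara = ps.map pvMkPara ∧
    (ps.map pvMkPara ++ toks).dropWhile pvIsPara = toks := by
  induction ps with
  | nil =>
    rcases toks with _ | ⟨t, ts⟩
    · simp
    · have ht : pvIsPara t = false := h t (by simp)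
      simp [ht]
  | cons p ps ih =>
    obtain ⟨ih1, ih2⟩ := ih
    have hp : pvIsPara (pvMkPara p) = true := by simp [pvIsPara, pvMkPara]
    simp [hp, ih1, ih2]

theorem pv_map_strip_id (ps : List String) (h : ∀ s ∈ ps, PySem.Str.strip s = s) :
    ps.map PySem.Str.strip = ps :=
  (List.map_congr_left h).trans (List.map_id _)

-- how pvCoalesce eats a nonempty pending-paragraph prefix, a blank token, a tag token
theorem pv_coalesce_para_prefix (p : String) (ps : List String) (toks : List (String × String))
    (h : ∀ t ∈ toks.head?, pvIsPara t = false) :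
    pvCoalesce ((p :: ps).map pvMkPara ++ toks)
      = ("paragraph", PySem.Str.join " " (p :: ps)) :: pvCoalesce toks := by
  obtain ⟨htw, hdw⟩ := pv_tw_dw ps toks h
  rw [List.map_cons, List.cons_append, pvCoalesce_cons,
      if_pos (by simp [pvIsPara, pvMkPara] : pvIsPara (pvMkPara p) = true), htw, hdw]
  congr 1
  simp [pvMkPara, Function.comp_def]

theorem pv_coalesce_blank (toks : List (String × String)) :
    pvCoalesce (("blank", "") :: toks) = pvCoalesce toks := by
  rw [pvCoalesce_cons, if_neg (by simp [pvIsPara]), if_pos rfl]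

theorem pv_coalesce_tag (t : String × String) (toks : List (String × String))
    (htag : pvIsPara t = false) (hblank : ¬ t.1 = "blank") :
    pvCoalesce (t :: toks) = t :: pvCoalesce toks := by
  rw [pvCoalesce_cons, if_neg (by simp [htag]), if_neg hblank]

theorem pv_flushA_nil (blocks : List (String × String)) :
    pvFlushA (blocks, ([] : List String)) = (blocks, []) := by
  simp [pvFlushA]

theorem pv_flushA_cons (blocks : List (String × String)) (p : String) (ps : List String) :
    pvFlushA (blocks, p :: ps)
      = (blocks ++ [("paragraph", PySem.Str.join " " ((p :: ps).map PySem.Str.strip))], []) := by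
  simp [pvFlushA]

-- shared case of the invariant: a title/heading/bullet line (flush, then emit the token)
theorem pv_case_tag (ls : List String)
    (ih : ∀ (blocks : List (String × String)) (ps : List String),
      (∀ s ∈ ps, PySem.Str.strip s = s) →
      (pvFlushA (ls.foldl pvStepA (blocks, ps))).1
        = blocks ++ pvCoalesce (ps.map pvMkPara ++ ls.map pvClassify))
    (blocks : List (String × String)) (ps : List String)
    (hps : ∀ s ∈ ps, PySem.Str.strip s = s)
    (l : String) (t : String × String)
    (hstep : pvStepA (blocks, ps) l = ((pvFlushA (blocks, ps)).1 ++ [t], (pvFlushA (blocks, ps)).2))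
    (htok : pvClassify l = t)
    (htag : pvIsPara t = false) (hblank : ¬ t.1 = "blank") :
    (pvFlushA (ls.foldl pvStepA (pvStepA (blocks, ps) l))).1
      = blocks ++ pvCoalesce (ps.map pvMkPara ++ pvClassify l :: ls.map pvClassify) := by
  rw [hstep, htok]
  rcases ps with _ | ⟨p, ps'⟩
  · rw [pv_flushA_nil]
    rw [show ((blocks, ([] : List String)).1 ++ [t], (blocks, ([] : List String)).2)
          = (blocks ++ [t], ([] : List String)) from rfl]
    rw [ih (blocks ++ [t]) [] (by simp)]
    simp only [List.map_nil, List.nil_append]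
    rw [pv_coalesce_tag t _ htag hblank]
    simp
  · rw [pv_flushA_cons]
    rw [show ((blocks ++ [("paragraph", PySem.Str.join " " ((p :: ps').map PySem.Str.strip))], ([] : List String)).1 ++ [t],
             (blocks ++ [("paragraph", PySem.Str.join " " ((p :: ps').map PySem.Str.strip))], ([] : List String)).2)
          = (blocks ++ [("paragraph", PySem.Str.join " " ((p :: ps').map PySem.Str.strip))] ++ [t], ([] : List String)) from rfl]
    rw [ih _ [] (by simp)]
    rw [pv_coalesce_para_prefix p ps' (t :: ls.map pvClassify)
          (by intro u hu; simp at hu; subst hu; exact htag)]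
    rw [pv_coalesce_tag t _ htag hblank]
    simp only [List.map_nil, List.nil_append]
    rw [pv_map_strip_id _ hps]
    simp

-- the loop invariant: A's fold with pending paragraphs ps equals blocks ++ B's coalesce
-- of the pending paragraph tokens followed by the remaining classified lines
theorem pv_loopA_eq (lines : List String) : ∀ (blocks : List (String × String)) (ps : List String),
    (∀ s ∈ ps, PySem.Str.strip s = s) →
    (pvFlushA (lines.foldl pvStepA (blocks, ps))).1
      = blocks ++ pvCoalesce (ps.map pvMkPara ++ lines.map pvClassify) := by
  induction lines with
  | nil =>
    intro blocks ps hps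
    rcases ps with _ | ⟨p, ps'⟩
    · simp [pvFlushA, pvCoalesce]
    · rw [List.foldl_nil, pv_flushA_cons, List.map_nil,
          pv_coalesce_para_prefix p ps' [] (by simp), pv_map_strip_id _ hps]
      simp [pvCoalesce]
  | cons l ls ih =>
    intro blocks ps hps
    rw [List.foldl_cons, List.map_cons]
    by_cases h0 : PySem.Str.strip (PySem.Str.rstrip l) = ""
    · -- blank line
      have hstep : pvStepA (blocks, ps) l = pvFlushA (blocks, ps) := by
        simp only [pvStepA]; rw [if_pos h0]
      have htok : pvClassify l = ("blank", "") := by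
        simp only [pvClassify]; rw [if_pos h0]
      rcases ps with _ | ⟨p, ps'⟩
      · rw [hstep, pv_flushA_nil, ih blocks [] (by simp), htok]
        simp only [List.map_nil, List.nil_append]
        rw [pv_coalesce_blank]
      · rw [hstep, pv_flushA_cons, ih _ [] (by simp), htok]
        rw [pv_coalesce_para_prefix p ps' (("blank", "") :: ls.map pvClassify)
              (by intro u hu; simp at hu; subst hu; simp [pvIsPara])]
        rw [pv_coalesce_blank]
        simp only [List.map_nil, List.nil_append]
        rw [pv_map_strip_id _ hps]
        simp
    · by_cases h1 : PySem.Str.startswith (PySem.Str.strip (PySem.Str.rstrip l)) "# " = true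
      · exact pv_case_tag ls ih blocks ps hps l
          ("title", PySem.Str.strip (PySem.Str.slice (PySem.Str.strip (PySem.Str.rstrip l)) (some 2) none))
          (by simp only [pvStepA]; rw [if_neg h0, if_pos h1])
          (by simp only [pvClassify]; rw [if_neg h0, if_pos h1])
          (by simp [pvIsPara]) (by simp)
      · by_cases h2 : PySem.Str.startswith (PySem.Str.strip (PySem.Str.rstrip l)) "## " = true
        · exact pv_case_tag ls ih blocks ps hps l
            ("heading", PySem.Str.strip (PySem.Str.slice (PySem.Str.strip (PySem.Str.rstrip l)) (some 3) none))
            (by simp only [pvStepA]; rw [if_neg h0, if_neg h1, if_pos h2])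
            (by simp only [pvClassify]; rw [if_neg h0, if_neg h1, if_pos h2])
            (by simp [pvIsPara]) (by simp)
        · by_cases h3 : PySem.Str.startswith (PySem.Str.strip (PySem.Str.rstrip l)) "- " = true
          · exact pv_case_tag ls ih blocks ps hps l
              ("bullet", PySem.Str.strip (PySem.Str.slice (PySem.Str.strip (PySem.Str.rstrip l)) (some 2) none))
              (by simp only [pvStepA]; rw [if_neg h0, if_neg h1, if_neg h2, if_pos h3])
              (by simp only [pvClassify]; rw [if_neg h0, if_neg h1, if_neg h2, if_pos h3])
              (by simp [pvIsPara]) (by simp)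
          · -- paragraph line
            have hstep : pvStepA (blocks, ps) l
                = (blocks, ps ++ [PySem.Str.strip (PySem.Str.rstrip l)]) := by
              simp only [pvStepA]; rw [if_neg h0, if_neg h1, if_neg h2, if_neg h3]
            have htok : pvClassify l = ("paragraph", PySem.Str.strip (PySem.Str.rstrip l)) := by
              simp only [pvClassify]; rw [if_neg h0, if_neg h1, if_neg h2, if_neg h3]
            rw [hstep, htok, ih blocks _ ?_]
            · simp [pvMkPara]
            · intro s hs
              rcases List.mem_append.mp hs with h | h
              · exact hps s h
              · simp at h; subst h; exact pv_strip_idem_str _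

-- ===== VERDICT (by name: the statement is the Claim_ definition above) =====
theorem parse_blocks_spec : Claim_equal_parse_blocks := by
  intro md _
  unfold Spec_parse_blocks parse_blocks parse_blocks_alt
  have h := pv_loopA_eq (PySem.Str.splitlines md) [] [] (by simp)
  simpa using h
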